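-- pv_equiv track=rewrite | github.com/Veagle-Sport/AI | examples/soccer/Events/events.py | _cluster_frames
-- ===== SOURCE A (Python) =====
-- def _cluster_frames(frames, min_gap=30):
--     """Cluster consecutive frames into events"""
--     if not frames:
--         return []
--
--     frames = sorted(frames)
--     clusters = [[frames[0]]]
--
--     for frame in frames[1:]:
--         if frame - clusters[-1][-1] <= min_gap:
--             clusters[-1].append(frame)
--         else:
--             clusters.append([frame])
--
--     return clusters
-- ===== SOURCE B (Python) =====
-- def _cluster_frames(frames, min_gap=30):
--     """Cluster consecutive frames into events (staged: find cut indices, then slice)."""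
--     fs = sorted(frames)
--     if not fs:
--         return []
--     cuts = [i for i in range(1, len(fs)) if fs[i] - fs[i - 1] > min_gap]
--     edges = [0] + cuts + [len(fs)]
--     return [fs[a:b] for a, b in zip(edges, edges[1:])]
-- ===== Notes on version B (the rewrite author's own statement) =====
-- stated objective: alternative
-- what changed: B replaces A's incremental grow-the-last-cluster loop by two staged passes: it first computes the list of boundary indices where the gap exceeds min_gap, then splits the sorted list by slicing between consecutive boundary positions.
import Mathlib
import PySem

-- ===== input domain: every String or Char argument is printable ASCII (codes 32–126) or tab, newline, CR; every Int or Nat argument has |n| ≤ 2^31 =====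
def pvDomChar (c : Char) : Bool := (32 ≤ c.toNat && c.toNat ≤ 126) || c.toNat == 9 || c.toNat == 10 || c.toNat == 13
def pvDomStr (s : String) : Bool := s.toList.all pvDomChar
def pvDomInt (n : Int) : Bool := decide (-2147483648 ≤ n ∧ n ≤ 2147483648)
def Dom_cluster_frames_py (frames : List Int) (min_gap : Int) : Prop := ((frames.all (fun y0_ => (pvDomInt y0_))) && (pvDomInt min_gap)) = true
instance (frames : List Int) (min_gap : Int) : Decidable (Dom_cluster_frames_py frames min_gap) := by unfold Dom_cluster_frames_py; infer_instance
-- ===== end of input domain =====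

-- B replaces A's grow-the-last-cluster loop by two staged passes: first the cut indices, then slicing between them (objective: alternative decomposition, same cost).

-- ===== PORT A =====
-- A: sort, start clusters = [[first]], then for each later frame either append it to the
-- last cluster or start a new one.  State (acc, cur) represents clusters = acc ++ [cur].
def cluster_frames_py (frames : List Int) (min_gap : Int) : List (List Int) :=
  match PySem.List.sorted frames (fun x => x) false with
  | [] => []                               -- "if not frames: return []"
  | x :: rest =>
    let st := rest.foldl
      (fun (st : List (List Int) × List Int) f =>
        if f - st.2.getLastD 0 ≤ min_gap then (st.1, st.2 ++ [f])   -- clusters[-1].append(frame)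
        else (st.1 ++ [st.2], [f]))                                  -- clusters.append([frame])
      ([], [x])
    st.1 ++ [st.2]

-- ===== PORT B =====
-- B: fs = sorted(frames); cuts = [i for i in range(1, len(fs)) if fs[i] - fs[i-1] > min_gap];
-- edges = [0] + cuts + [len(fs)]; return [fs[a:b] for a, b in zip(edges, edges[1:])].
-- (fs[i] / fs[i-1] are ported with pyGetD; the indices drawn from range(1, len(fs)) are in range.)
def cluster_frames_py_alt (frames : List Int) (min_gap : Int) : List (List Int) :=
  let fs := PySem.List.sorted frames (fun x => x) false
  if fs = [] then []
  else
    let cuts := (PySem.List.pyRange 1 (fs.length : Int) 1).filter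
      (fun i => decide (PySem.List.pyGetD fs i 0 - PySem.List.pyGetD fs (i - 1) 0 > min_gap))
    let edges := (0 : Int) :: (cuts ++ [(fs.length : Int)])
    (edges.zip (PySem.List.slice edges (some 1) none)).map
      (fun p => PySem.List.slice fs (some p.1) (some p.2))

-- ===== PRECONDITION & SPEC =====
def Spec_cluster_frames_py (frames : List Int) (min_gap : Int) (out : List (List Int)) : Prop := out = cluster_frames_py_alt frames min_gap
instance (frames : List Int) (min_gap : Int) (out : List (List Int)) : Decidable (Spec_cluster_frames_py frames min_gap out) := by unfold Spec_cluster_frames_py; infer_instance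

-- ===== CLAIM (what is proved, stated in full; the proofs are below) =====
def Claim_equal_cluster_frames_py : Prop := ∀ (frames : List Int) (min_gap : Int), Dom_cluster_frames_py frames min_gap → Spec_cluster_frames_py frames min_gap (cluster_frames_py frames min_gap)

-- ===== LEMMAS AND PROOFS =====

-- reference clustering: pvChunk g cur l finishes the current cluster `cur` through `l`.
def pvChunk (g : Int) (cur : List Int) : List Int → List (List Int)
  | [] => [cur]
  | y :: l => if y - cur.getLastD 0 ≤ g then pvChunk g (cur ++ [y]) l else cur :: pvChunk g [y] l

-- A's fold equals pvChunk
theorem pvFoldA_eq_chunk (g : Int) (l : List Int) :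
    ∀ (acc : List (List Int)) (cur : List Int),
      (let st := l.foldl
        (fun (st : List (List Int) × List Int) f =>
          if f - st.2.getLastD 0 ≤ g then (st.1, st.2 ++ [f]) else (st.1 ++ [st.2], [f]))
        (acc, cur)
       st.1 ++ [st.2]) = acc ++ pvChunk g cur l := by
  induction l with
  | nil => intro acc cur; simp [pvChunk]
  | cons y l ih =>
    intro acc cur
    simp only [List.foldl_cons, pvChunk]
    by_cases h : y - cur.getLastD 0 ≤ g
    · simp only [h, if_pos]
      exact ih acc (cur ++ [y])
    · simp only [h, if_neg, not_false_iff]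
      rw [ih (acc ++ [cur]) [y], List.append_assoc]
      simp

-- B-side reference: the cut positions of the suffix `rest`, whose first element sits at
-- index i of fs and whose predecessor is prev.
def pvCuts (g : Int) : Nat → Int → List Int → List Int
  | _, _, [] => []
  | i, prev, y :: l =>
    if y - prev > g then (i : Int) :: pvCuts g (i + 1) y l else pvCuts g (i + 1) y l

theorem pvFilter_eq_cuts (g : Int) (fs : List Int) :
    ∀ (rest : List Int) (prev : Int) (i : Nat), 1 ≤ i → fs.drop (i - 1) = prev :: rest →
      (PySem.List.pyRange (i : Int) (fs.length : Int) 1).filter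
        (fun j => decide (PySem.List.pyGetD fs j 0 - PySem.List.pyGetD fs (j - 1) 0 > g))
      = pvCuts g i prev rest := by
  intro rest
  induction rest with
  | nil =>
    intro prev i h1 hd
    have hlen : fs.length = i := by
      have := congrArg List.length hd
      simp only [List.length_drop, List.length_cons, List.length_nil] at this
      omega
    rw [hlen, PySem.List.pyRange_one_eq_nil (le_refl _)]
    rfl
  | cons y l ih =>
    intro prev i h1 hd
    have hlen : i < fs.length := by
      have := congrArg List.length hd
      simp only [List.length_drop, List.length_cons] at this
      omega
    have hprev : fs[(i-1) + 0]? = some prev := by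
      rw [← List.getElem?_drop, hd]; rfl
    have hy : fs[(i-1) + 1]? = some y := by
      rw [← List.getElem?_drop, hd]; rfl
    have hgi : PySem.List.pyGetD fs ((i : Nat) : Int) 0 = y := by
      rw [PySem.List.pyGetD_natCast]
      have h2 : (i - 1) + 1 = i := by omega
      rw [h2] at hy
      simp [List.getD, hy]
    have hgp : PySem.List.pyGetD fs (((i : Nat) : Int) - 1) 0 = prev := by
      have hcast : ((i : Nat) : Int) - 1 = (((i - 1 : Nat)) : Int) := by omega
      rw [hcast, PySem.List.pyGetD_natCast]
      rw [Nat.add_zero] at hprev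
      simp [List.getD, hprev]
    have hd' : fs.drop ((i + 1) - 1) = y :: l := by
      have h3 : i - 1 + 1 = i := by omega
      have h2 := congrArg (List.drop 1) hd
      rw [List.drop_drop, h3] at h2
      simpa using h2
    have hlt : ((i : Nat) : Int) < (fs.length : Int) := by exact_mod_cast hlen
    rw [PySem.List.pyRange_one_cons hlt]
    have hnext : ((i : Nat) : Int) + 1 = (((i + 1 : Nat)) : Int) := by push_cast; ring
    rw [List.filter_cons]
    simp only [hgi, hgp, pvCuts]
    by_cases hc : y - prev > g
    · simp only [hc, decide_true, if_pos]
      rw [hnext, ih y (i+1) (by omega) hd']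
    · simp only [hc, decide_false, if_neg, Bool.false_eq_true, not_false_iff]
      rw [hnext, ih y (i+1) (by omega) hd']

theorem pvSlices_eq_chunk (g : Int) :
    ∀ (rest fs cur : List Int) (s : Nat), cur ≠ [] → fs.drop s = cur ++ rest →
      (((s : Int) :: (pvCuts g (s + cur.length) (cur.getLastD 0) rest ++ [(fs.length : Int)])).zip
        (pvCuts g (s + cur.length) (cur.getLastD 0) rest ++ [(fs.length : Int)])).map
        (fun p => PySem.List.slice fs (some p.1) (some p.2))
      = pvChunk g cur rest := by
  intro rest
  induction rest with
  | nil =>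
    intro fs cur s hne hd
    rw [List.append_nil] at hd
    simp only [pvCuts, List.nil_append, pvChunk, List.zip_cons_cons, List.zip_nil_right,
      List.map_cons, List.map_nil]
    congr 1
    rw [PySem.List.slice_natCast]
    rw [hd]
    have : fs.length - s = cur.length := by
      have := congrArg List.length hd
      simp only [List.length_drop] at this
      omega
    rw [this, List.take_length]
  | cons y l ih =>
    intro fs cur s hne hd
    by_cases hc : y - cur.getLastD 0 ≤ g
    · have hc' : ¬ (y - cur.getLastD 0 > g) := by omega
      simp only [pvCuts, pvChunk, hc, if_pos, hc']
      have hd' : fs.drop s = (cur ++ [y]) ++ l := by simpa using hd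
      have := ih fs (cur ++ [y]) s (by simp) hd'
      rw [List.getLastD_concat, List.length_append] at this
      simp only [List.length_cons, List.length_nil, Nat.zero_add] at this
      rw [← Nat.add_assoc] at this
      exact this
    · have hcg : y - cur.getLastD 0 > g := by omega
      rw [show pvChunk g cur (y :: l) = cur :: pvChunk g [y] l from by
            simp only [pvChunk]; rw [if_neg hc]]
      rw [show pvCuts g (s + cur.length) (cur.getLastD 0) (y :: l)
            = ((s + cur.length : Nat) : Int) :: pvCuts g (s + cur.length + 1) y l from by
          simp only [pvCuts]; rw [if_pos hcg]]
      have hdi : fs.drop (s + cur.length) = [y] ++ l := by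
        have h2 := congrArg (List.drop cur.length) hd
        rw [List.drop_drop, List.drop_left] at h2
        simpa using h2
      have htail := ih fs [y] (s + cur.length) (by simp) hdi
      simp only [List.getLastD_cons, List.getLastD_nil, List.length_cons, List.length_nil,
        Nat.zero_add] at htail
      simp only [List.cons_append, List.zip_cons_cons, List.map_cons]
      rw [htail,
          show ((s + cur.length : Nat) : Int) = ((s : Nat) : Int) + ((cur.length : Nat) : Int) from by
            push_cast; ring,
          PySem.List.slice_natCast_add, hd, List.take_left]

theorem cluster_frames_py_spec : Claim_equal_cluster_frames_py := by
  intro frames min_gap _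
  unfold Spec_cluster_frames_py cluster_frames_py cluster_frames_py_alt
  cases hs : PySem.List.sorted frames (fun x => x) false with
  | nil => simp
  | cons x rest =>
    have hne : (x :: rest : List Int) ≠ [] := by simp
    simp only [hne, if_neg, not_false_iff]
    have hA := pvFoldA_eq_chunk min_gap rest [] [x]
    simp only [List.nil_append] at hA
    rw [hA]
    have hcuts := pvFilter_eq_cuts min_gap (x :: rest) rest x 1 (le_refl 1) (by simp)
    simp only [Nat.cast_one] at hcuts
    rw [hcuts, PySem.List.slice_from_one, List.tail_cons]
    have hB := pvSlices_eq_chunk min_gap rest (x :: rest) [x] 0 (by simp) (by simp)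
    simp only [List.length_cons, List.length_nil, Nat.zero_add, List.getLastD_cons,
      List.getLastD_nil, Nat.cast_zero] at hB
    exact hB.symm
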